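-- pv_equiv track=rewrite | github.com/gjbm2/dagnet | bayes/dsl_explosion.py | _find_dot_paren
-- ===== SOURCE A (Python) =====
-- def _find_dot_paren(s: str) -> int:
--     depth = 0
--     for i in range(len(s) - 1):
--         ch = s[i]
--         if ch == "(":
--             depth += 1
--         elif ch == ")":
--             depth -= 1
--         if depth == 0 and s[i:i + 2] == ".(":
--             # Make sure this isn't .or(
--             rest = s[i + 1:]
--             if rest.startswith("or"):
--                 j = 2
--                 while j < len(rest) and rest[j].isspace():
--                     j += 1
--                 if j < len(rest) and rest[j] == "(":
--                     continue  # This is .or(...), not .(...)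
--             return i
--     return -1
-- ===== SOURCE B (Python) =====
-- def _find_dot_paren(s: str) -> int:
--     # Candidate-then-check: find each '.(' occurrence, return the first whose
--     # prefix is parenthesis-balanced (top level). The '.or(' guard in A is dead
--     # code: the character after the matched '.' is always '(', never 'o'.
--     start = 0
--     while True:
--         i = s.find(".(", start)
--         if i == -1:
--             return -1
--         if s[:i].count("(") == s[:i].count(")"):
--             return i
--         start = i + 1
-- ===== Notes on version B (the rewrite author's own statement) =====
-- stated objective: faster
-- what changed: Replaces the single character-by-character scan that maintains an incremental depth counter (and carries a dead '.or(' guard) by candidate search: repeatedly s.find('.(', start) and, for each candidate i, one prefix-balance check s[:i].count('(') == s[:i].count(')').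
import Mathlib
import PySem

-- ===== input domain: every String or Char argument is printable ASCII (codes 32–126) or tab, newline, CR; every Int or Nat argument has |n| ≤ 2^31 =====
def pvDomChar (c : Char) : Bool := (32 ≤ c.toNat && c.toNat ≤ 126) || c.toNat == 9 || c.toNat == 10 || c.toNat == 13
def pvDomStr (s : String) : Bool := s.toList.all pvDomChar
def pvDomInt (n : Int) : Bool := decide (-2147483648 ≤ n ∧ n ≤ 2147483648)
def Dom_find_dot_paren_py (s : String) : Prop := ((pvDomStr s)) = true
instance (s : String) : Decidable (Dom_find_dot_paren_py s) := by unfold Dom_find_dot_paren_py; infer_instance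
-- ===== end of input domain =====

-- B replaces A's stateful depth-counting scan (with its dead '.or(' guard) by repeated
-- substring search for '.(' plus a per-candidate prefix parenthesis-count balance check;
-- objective: alternative decomposition, same return value.


-- ===== PORT A =====
-- while j < len(rest) and rest[j].isspace(): j += 1
def pvA_skipWs (rest : List Char) (j : Nat) : Nat :=
  if h : j < rest.length ∧ PySem.Chars.isspace (PySem.List.pyGetD rest (j : Int) ' ') then
    pvA_skipWs rest (j + 1)
  else j
termination_by rest.length - j
decreasing_by omega

-- the 'for i in range(len(s) - 1)' loop, with early return; depth carried as state
def pvA_loop (cs : List Char) (idxs : List Nat) (depth : Int) : Int :=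
  match idxs with
  | [] => -1
  | i :: rest =>
    let ch := PySem.List.pyGetD cs (i : Int) ' '
    let depth := if ch = '(' then depth + 1 else if ch = ')' then depth - 1 else depth
    if depth = 0 ∧ PySem.List.slice cs (some (i : Int)) (some ((i : Int) + 2)) = ['.', '('] then
      let r := PySem.List.slice cs (some ((i : Int) + 1)) none
      if PySem.Chars.startswith r ['o', 'r'] then
        let j := pvA_skipWs r 2
        if j < r.length ∧ PySem.List.pyGetD r (j : Int) ' ' = '(' then pvA_loop cs rest depth
        else (i : Int)
      else (i : Int)
    else pvA_loop cs rest depth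

def find_dot_paren_py (s : String) : Int :=
  pvA_loop s.toList (List.range (s.toList.length - 1)) 0

-- ===== PORT B =====
-- while True: i = s.find('.(', start); …; start = i + 1   (fuel only makes it total;
-- fuel len+1 is never exhausted since start strictly increases and stays ≤ len)
def pvB_loop (cs : List Char) (start : Nat) (fuel : Nat) : Int :=
  match fuel with
  | 0 => -1
  | fuel + 1 =>
    let i := PySem.Chars.findFrom cs ['.', '('] (start : Int) none
    if i = -1 then -1
    else if PySem.Chars.count (PySem.List.slice cs none (some i)) ['('] =
            PySem.Chars.count (PySem.List.slice cs none (some i)) [')'] then i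
    else pvB_loop cs (i.toNat + 1) fuel

def find_dot_paren_py_alt (s : String) : Int :=
  pvB_loop s.toList 0 (s.toList.length + 1)

-- ===== PRECONDITION & SPEC =====
def Spec_find_dot_paren_py (s : String) (out : Int) : Prop := out = find_dot_paren_py_alt s
instance (s : String) (out : Int) : Decidable (Spec_find_dot_paren_py s out) := by unfold Spec_find_dot_paren_py; infer_instance

-- ===== CLAIM (what is proved, stated in full; the proofs are below) =====
def Claim_equal_find_dot_paren_py : Prop := ∀ (s : String), Dom_find_dot_paren_py s → Spec_find_dot_paren_py s (find_dot_paren_py s)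

-- ===== LEMMAS AND PROOFS =====

-- parenthesis balance of a prefix
def pvBal (l : List Char) : Int := (l.count '(' : Int) - (l.count ')' : Int)

-- "index i is a top-level '.(' occurrence"
def pvGood (cs : List Char) (i : Nat) : Bool :=
  decide (['.', '('] <+: cs.drop i) && decide (pvBal (cs.take i) = 0)

-- both ports return the first good index in range(len-1), else -1
def pvFirst (cs : List Char) : Int :=
  match (List.range' 0 (cs.length - 1)).find? (pvGood cs) with
  | some i => (i : Int)
  | none => -1

lemma pvFind?_range'_some {p : Nat → Bool} :
    ∀ (m s k : Nat), s ≤ k → k < s + m → p k = true → (∀ i, s ≤ i → i < k → p i = false) →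
      (List.range' s m).find? p = some k := by
  intro m
  induction m with
  | zero => intro s k h1 h2; omega
  | succ m ih =>
    intro s k h1 h2 hk hlt
    rw [List.range'_succ, List.find?_cons]
    rcases Nat.eq_or_lt_of_le h1 with h | h
    · subst h; simp [hk]
    · rw [hlt s le_rfl h]
      exact ih (s + 1) k h (by omega) hk (fun i hi1 hi2 => hlt i (by omega) hi2)

lemma pvFind?_range'_none {p : Nat → Bool} :
    ∀ (m s : Nat), (∀ i, s ≤ i → i < s + m → p i = false) →
      (List.range' s m).find? p = none := by
  intro m
  induction m with
  | zero => intro s _; simp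
  | succ m ih =>
    intro s h
    rw [List.range'_succ, List.find?_cons, h s le_rfl (by omega)]
    exact ih (s + 1) (fun i hi1 hi2 => h i (by omega) (by omega))

-- Chars.count with a single-character needle is List.count
lemma pvCountGo_singleton (c : Char) :
    ∀ (fuel : Nat) (l : List Char) (acc : Nat), l.length ≤ fuel →
      PySem.Chars.count.go [c] fuel l acc = acc + l.count c := by
  intro fuel
  induction fuel with
  | zero =>
    intro l acc h
    have : l = [] := List.eq_nil_of_length_eq_zero (by omega)
    subst this; simp [PySem.Chars.count.go]
  | succ fuel ih =>
    intro l acc h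
    match l with
    | [] => simp [PySem.Chars.count.go]
    | x :: t =>
      by_cases hx : x = c
      · subst hx
        rw [PySem.Chars.count.go]
        have h1 : List.isPrefixOf [x] (x :: t) = true := by simp [List.isPrefixOf]
        have h2 : List.drop ([x].length) (x :: t) = t := by simp
        rw [if_pos h1, h2, ih t (acc + 1) (by simp at h; omega)]
        simp
        omega
      · rw [PySem.Chars.count.go]
        have h1 : List.isPrefixOf [c] (x :: t) = false := by
          simp [List.isPrefixOf]
          exact fun h' => absurd h'.symm hx
        simp only [h1, Bool.false_eq_true, if_false]
        rw [ih t acc (by simp at h; omega)]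
        simp [hx]

lemma pvCount_singleton (l : List Char) (c : Char) :
    PySem.Chars.count l [c] = l.count c := by
  have := pvCountGo_singleton c l.length l 0 le_rfl
  simpa [PySem.Chars.count]

-- balance evolves by one step
lemma pvBal_take_succ (cs : List Char) (i : Nat) (h : i < cs.length) :
    pvBal (cs.take (i + 1)) =
      (if cs.getD i ' ' = '(' then pvBal (cs.take i) + 1
       else if cs.getD i ' ' = ')' then pvBal (cs.take i) - 1 else pvBal (cs.take i)) := by
  have : cs.take (i + 1) = cs.take i ++ [cs[i]] := by
    rw [List.take_add_one]; simp [List.getElem?_eq_getElem h]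
  rw [this]
  have hg : cs.getD i ' ' = cs[i] := List.getD_eq_getElem cs ' ' h
  simp only [pvBal, List.count_append, List.count_singleton, hg]
  split_ifs <;> simp_all <;> omega

-- a '.(' match pins the slice and the current char
lemma pvSlice_pair (cs : List Char) (i : Nat) :
    PySem.List.slice cs (some (i : Int)) (some ((i : Int) + 2)) = (cs.drop i).take 2 := by
  have : ((i : Int) + 2) = ((i : Int) + ((2 : Nat) : Int)) := by push_cast; ring
  rw [this, PySem.List.slice_natCast_add]

lemma pvPatt_iff (cs : List Char) (i : Nat) :
    PySem.List.slice cs (some (i : Int)) (some ((i : Int) + 2)) = ['.', '('] ↔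
      ['.', '('] <+: cs.drop i := by
  rw [pvSlice_pair, List.prefix_iff_eq_take]
  constructor <;> intro h <;> simpa using h.symm

-- A's loop computes pvFirst (restricted to its remaining index range)
lemma pvA_loop_eq (cs : List Char) :
    ∀ (m k : Nat) (depth : Int), k + m = cs.length - 1 → depth = pvBal (cs.take k) →
      pvA_loop cs (List.range' k m) depth =
        (match (List.range' k m).find? (pvGood cs) with
         | some i => (i : Int) | none => -1) := by
  intro m
  induction m with
  | zero => intro k depth _ _; simp [pvA_loop]
  | succ m ih =>
    intro k depth hk hd
    have hklen : k + 2 ≤ cs.length := by omega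
    rw [List.range'_succ]
    simp only [pvA_loop, List.find?_cons, PySem.List.pyGetD_natCast]
    by_cases hp : ['.', '('] <+: cs.drop k
    · obtain ⟨u, hu⟩ := hp
      have hdk : cs.drop k = '.' :: '(' :: u := hu.symm
      have hk0 : cs.getD k ' ' = '.' := by
        have h2 : (List.drop k cs)[0]? = some '.' := by rw [hdk]; rfl
        rw [List.getElem?_drop, Nat.add_zero] at h2
        rw [List.getD_eq_getElem?_getD, h2]
        rfl
      have hdepth : (if cs.getD k ' ' = '(' then depth + 1
          else if cs.getD k ' ' = ')' then depth - 1 else depth) = pvBal (cs.take k) := by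
        rw [hk0, hd]; simp
      rw [hdepth]
      have hpre : ['.', '('] <+: cs.drop k := ⟨u, hu⟩
      by_cases hb : pvBal (cs.take k) = 0
      · rw [if_pos ⟨hb, (pvPatt_iff cs k).2 hpre⟩]
        have hr : PySem.List.slice cs (some ((k : Int) + 1)) none = '(' :: u := by
          have : ((k : Int) + 1) = (((k + 1 : Nat)) : Int) := by push_cast; ring
          rw [this, PySem.List.slice_from_natCast, ← List.drop_drop, hdk]
          rfl
        have hsw : PySem.Chars.startswith ('(' :: u) ['o', 'r'] = false := by
          simp [PySem.Chars.startswith, List.isPrefixOf]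
        rw [hr, hsw]
        have hg : pvGood cs k = true := by simp [pvGood, hpre, hb]
        simp [hg]
      · rw [if_neg (fun hc => hb hc.1)]
        have hg : pvGood cs k = false := by simp [pvGood, hb]
        rw [hg]
        exact ih (k + 1) _ (by omega)
          (by rw [pvBal_take_succ cs k (by omega), hk0]; simp)
    · rw [if_neg (fun hc => hp ((pvPatt_iff cs k).1 hc.2))]
      have hg : pvGood cs k = false := by simp [pvGood, hp]
      rw [hg]
      exact ih (k + 1) _ (by omega) (by rw [pvBal_take_succ cs k (by omega), hd])

-- B's loop computes pvFirst given the no-good-below-start invariant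
lemma pvB_loop_eq (cs : List Char) :
    ∀ (fuel start : Nat), start ≤ cs.length → cs.length - start < fuel →
      (∀ i, i < start → pvGood cs i = false) →
      pvB_loop cs start fuel = pvFirst cs := by
  intro fuel
  induction fuel with
  | zero => intro start _ h _; omega
  | succ fuel ih =>
    intro start hs hf hinv
    simp only [pvB_loop]
    by_cases hr : PySem.Chars.findFrom cs ['.', '('] (start : Int) none = -1
    · rw [if_pos hr]
      have hnone : ¬ ['.', '('] <:+: cs.drop start :=
        (PySem.Chars.findFrom_natCast_eq_neg_one_iff cs ['.', '('] start hs).1 hr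
      have : (List.range' 0 (cs.length - 1)).find? (pvGood cs) = none := by
        apply pvFind?_range'_none
        intro i _ hi2
        by_cases hlt : i < start
        · exact hinv i hlt
        · simp only [pvGood, Bool.and_eq_false_iff, decide_eq_false_iff_not]
          left
          intro hpre
          apply hnone
          have h2 : cs.drop i = List.drop (i - start) (cs.drop start) := by
            rw [List.drop_drop]; congr 1; omega
          rw [h2] at hpre
          exact hpre.isInfix.trans (List.drop_suffix _ _).isInfix
      simp [pvFirst, this]
    · rw [if_neg hr]
      obtain ⟨hge, hpre, hmin⟩ :=
        PySem.Chars.findFrom_natCast_spec cs ['.', '('] start hs hr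
      set r := PySem.Chars.findFrom cs ['.', '('] (start : Int) none with hrdef
      have hr0 : 0 ≤ r := le_trans (Int.natCast_nonneg start) hge
      have hrn : ((r.toNat : Nat) : Int) = r := Int.toNat_of_nonneg hr0
      have hlen2 : r.toNat + 2 ≤ cs.length := by
        have := hpre.length_le
        simp [List.length_drop] at this
        omega
      have hstart_le : start ≤ r.toNat := by omega
      have hslice : PySem.List.slice cs none (some r) = cs.take r.toNat :=
        PySem.List.slice_to cs hr0
      rw [hslice]
      by_cases hb : PySem.Chars.count (cs.take r.toNat) ['('] =
          PySem.Chars.count (cs.take r.toNat) [')']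
      · rw [if_pos hb]
        have hbal : pvBal (cs.take r.toNat) = 0 := by
          rw [pvCount_singleton, pvCount_singleton] at hb
          simp [pvBal, hb]
        have hfind : (List.range' 0 (cs.length - 1)).find? (pvGood cs) = some r.toNat := by
          apply pvFind?_range'_some 
          · omega
          · omega
          · simp [pvGood, hpre, hbal]
          · intro i _ hik
            by_cases hlt : i < start
            · exact hinv i hlt
            · simp only [pvGood, Bool.and_eq_false_iff, decide_eq_false_iff_not]
              left
              exact hmin i (by omega) hik
        simp [pvFirst, hfind, hrn]
      · rw [if_neg hb]
        apply ih (r.toNat + 1) (by omega) (by omega)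
        intro i hi
        by_cases hlt : i < start
        · exact hinv i hlt
        · by_cases hik : i < r.toNat
          · simp only [pvGood, Bool.and_eq_false_iff, decide_eq_false_iff_not]
            left
            exact hmin i (by omega) hik
          · have : i = r.toNat := by omega
            subst this
            simp only [pvGood, Bool.and_eq_false_iff, decide_eq_false_iff_not]
            right
            intro hbal
            apply hb
            rw [pvCount_singleton, pvCount_singleton]
            simp [pvBal] at hbal
            omega

lemma pvA_eq_first (s : String) : find_dot_paren_py s = pvFirst s.toList := by
  unfold find_dot_paren_py pvFirst
  rw [List.range_eq_range']
  exact pvA_loop_eq s.toList (s.toList.length - 1) 0 0 (by omega) (by simp [pvBal])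

lemma pvB_eq_first (s : String) : find_dot_paren_py_alt s = pvFirst s.toList := by
  unfold find_dot_paren_py_alt
  exact pvB_loop_eq s.toList (s.toList.length + 1) 0 (by omega) (by omega) (by omega)

-- ===== VERDICT (by name: the statement is the Claim_ definition above) =====
theorem find_dot_paren_py_spec : Claim_equal_find_dot_paren_py := by
  intro s _
  unfold Spec_find_dot_paren_py
  rw [pvA_eq_first, pvB_eq_first]
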